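-- pv_equiv track=rewrite | github.com/GeekSky98/Algorithm_lab | Baekjoon/Gold/레벨 햄버거/expanation.py | solution
-- ===== SOURCE A (Python) =====
-- def solution(n, x):
--     dp = [0] * (n + 1)
--     dp_patty = [0] * (n + 1)
--     dp[0] = 1
--     dp_patty[0] = 1
--
--     for i in range(1, n + 1):
--         dp[i] = 2 * (dp[i-1]) + 3
--         dp_patty[i] = 2 * (dp_patty[i-1]) + 1
--
--     eaten = 0
--     level = n
--     while x > 0:
--         if level == 0:
--             eaten += 1
--             break
--         elif x == 1:
--             break
--         elif x <= 1 + dp[level - 1]: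
--             x -= 1
--             level -= 1
--         elif x == 2 + dp[level - 1]:
--             eaten += dp_patty[level - 1] + 1
--             break
--         elif x <= 2 + 2 * dp[level - 1]:
--             eaten += dp_patty[level - 1] + 1
--             x -= 2 + dp[level - 1]
--             level -= 1
--         else:
--             eaten += 2 * (dp_patty[level - 1]) + 1
--             break
--
--     return eaten
-- ===== SOURCE B (Python) =====
-- def solution(n, x):
--     # Closed-form burger sizes (2**(k+2)-3) and patty counts (2**(k+1)-1) replace
--     # A's dp arrays, and runs of "descend through the top bun" are skipped in one
--     # jump via x.bit_length(), so the loop runs O(log x) times instead of n times.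
--     eaten = 0
--     level = n
--     while x > 0:
--         if level == 0:
--             return eaten + 1
--         if x == 1:
--             return eaten
--         b = x.bit_length()
--         if level > b:
--             # here x <= 2**b - 1 < size(level-1): the next level-b iterations all
--             # just peel the top bun (x -= 1, level -= 1), unless x reaches 1 first
--             if x - (level - b) <= 1:
--                 return eaten
--             x -= level - b
--             level = b
--         else:
--             s = 2 ** (level + 1) - 3      # total size of a level-(level-1) burger
--             p = 2 ** level - 1            # patties in a level-(level-1) burger
--             if x <= 1 + s:
--                 x -= 1
--                 level -= 1
--             elif x <= 2 + s:
--                 return eaten + p + 1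
--             elif x <= 2 + 2 * s:
--                 eaten += p + 1
--                 x -= 2 + s
--                 level -= 1
--             else:
--                 return eaten + 2 * p + 1
--     return eaten
-- ===== Notes on version B (the rewrite author's own statement) =====
-- stated objective: faster
-- what changed: Replaced the dp/dp_patty arrays by closed-form powers of two and added a bit_length-based jump that collapses each run of top-bun-peeling iterations into one step, so the loop runs O(log x) times instead of n times.
import Mathlib
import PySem

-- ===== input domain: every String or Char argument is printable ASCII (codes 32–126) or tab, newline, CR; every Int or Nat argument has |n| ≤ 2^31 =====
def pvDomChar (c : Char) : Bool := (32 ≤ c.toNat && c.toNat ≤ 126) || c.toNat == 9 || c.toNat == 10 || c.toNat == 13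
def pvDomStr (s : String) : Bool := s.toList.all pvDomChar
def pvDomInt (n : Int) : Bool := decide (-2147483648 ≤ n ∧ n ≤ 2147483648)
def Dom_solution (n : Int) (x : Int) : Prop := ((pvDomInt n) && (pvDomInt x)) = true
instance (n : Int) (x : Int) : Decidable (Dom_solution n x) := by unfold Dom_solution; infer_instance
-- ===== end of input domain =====

-- B replaces A's dp arrays by closed-form powers of two and skips runs of
-- top-bun-peeling iterations in one bit_length-based jump (faster: O(log x)
-- loop iterations instead of n).

-- ===== PORT A =====
-- the while loop of A; fuel only totalizes the recursion (level decreases each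
-- iteration and stays ≥ 0, so fuel = n.toNat + 1 is never exhausted under Pre_)
def loopA (dp dpp : List Int) : Nat → Int → Int → Int → Int
  | 0, eaten, _, _ => eaten
  | fuel+1, eaten, level, x =>
    if 0 < x then
      if level = 0 then eaten + 1
      else if x = 1 then eaten
      else if x ≤ 1 + PySem.List.pyGetD dp (level - 1) 0 then
        loopA dp dpp fuel eaten (level - 1) (x - 1)
      else if x = 2 + PySem.List.pyGetD dp (level - 1) 0 then
        eaten + (PySem.List.pyGetD dpp (level - 1) 0 + 1)
      else if x ≤ 2 + 2 * PySem.List.pyGetD dp (level - 1) 0 then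
        loopA dp dpp fuel (eaten + (PySem.List.pyGetD dpp (level - 1) 0 + 1)) (level - 1)
          (x - (2 + PySem.List.pyGetD dp (level - 1) 0))
      else eaten + (2 * PySem.List.pyGetD dpp (level - 1) 0 + 1)
    else eaten

-- dp = [0]*(n+1); dp_patty = [0]*(n+1); dp[0] = dp_patty[0] = 1; the filling loop
def buildA (n : Int) : List Int × List Int :=
  let dp := PySem.List.pySetD (List.replicate (n+1).toNat (0:Int)) 0 1
  let dpp := PySem.List.pySetD (List.replicate (n+1).toNat (0:Int)) 0 1
  (PySem.List.pyRange 1 (n+1) 1).foldl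
    (fun st i =>
      (PySem.List.pySetD st.1 i (2 * PySem.List.pyGetD st.1 (i-1) 0 + 3),
       PySem.List.pySetD st.2 i (2 * PySem.List.pyGetD st.2 (i-1) 0 + 1))) (dp, dpp)

def solution (n : Int) (x : Int) : Int :=
  loopA (buildA n).1 (buildA n).2 (n.toNat + 1) 0 n x

-- ===== PORT B =====
-- the while loop of Source B; fuel only totalizes it (level strictly decreases and
-- stays ≥ 0 under Pre_).  2 ** (level+1) is ported as 2 ^ (level+1).toNat,
-- exact since this branch is only reached with level ≥ 1 under Pre_.
def loopB : Nat → Int → Int → Int → Int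
  | 0, eaten, _, _ => eaten
  | fuel+1, eaten, level, x =>
    if 0 < x then
      if level = 0 then eaten + 1
      else if x = 1 then eaten
      else if (PySem.Int.bitLength x : Int) < level then
        if x - (level - (PySem.Int.bitLength x : Int)) ≤ 1 then eaten
        else loopB fuel eaten (PySem.Int.bitLength x : Int)
               (x - (level - (PySem.Int.bitLength x : Int)))
      else
        if x ≤ 1 + (2 ^ (level + 1).toNat - 3) then loopB fuel eaten (level - 1) (x - 1)
        else if x ≤ 2 + (2 ^ (level + 1).toNat - 3) then eaten + ((2 ^ level.toNat - 1) + 1)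
        else if x ≤ 2 + 2 * (2 ^ (level + 1).toNat - 3) then
          loopB fuel (eaten + ((2 ^ level.toNat - 1) + 1)) (level - 1)
            (x - (2 + (2 ^ (level + 1).toNat - 3)))
        else eaten + (2 * (2 ^ level.toNat - 1) + 1)
    else eaten

def solution_alt (n : Int) (x : Int) : Int := loopB (n.toNat + 1) 0 n x

-- ===== PRECONDITION & SPEC =====
-- A raises IndexError for n < 0 ([0]*(n+1) is empty, so dp[0] = 1 fails)
def Pre_solution (n : Int) (x : Int) : Prop := 0 ≤ n
instance (n : Int) (x : Int) : Decidable (Pre_solution n x) := by unfold Pre_solution; infer_instance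
def pvWitness_solution : Int × Int := (2, 7)

def Spec_solution (n : Int) (x : Int) (out : Int) : Prop := out = solution_alt n x
instance (n : Int) (x : Int) (out : Int) : Decidable (Spec_solution n x out) := by unfold Spec_solution; infer_instance

-- ===== CLAIM (what is proved, stated in full; the proofs are below) =====
def Claim_equal_solution : Prop := ∀ (n : Int) (x : Int), Dom_solution n x → Pre_solution n x → Spec_solution n x (solution n x)

-- ===== LEMMAS AND PROOFS =====


-- reference function: patties in the first x bites of a level-L burger
def specF : Nat → Int → Int
  | 0, x => if 0 < x then 1 else 0
  | k+1, x =>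
    if 0 < x then
      if x = 1 then 0
      else if x ≤ 1 + (2 ^ (k+2) - 3) then specF k (x - 1)
      else if x ≤ 2 + (2 ^ (k+2) - 3) then (2 ^ (k+1) - 1) + 1
      else if x ≤ 2 + 2 * (2 ^ (k+2) - 3) then (2 ^ (k+1) - 1) + 1 + specF k (x - (2 + (2 ^ (k+2) - 3)))
      else 2 * (2 ^ (k+1) - 1) + 1
    else 0

theorem specF_nonpos (L : Nat) (x : Int) (hx : ¬ 0 < x) : specF L x = 0 := by
  cases L <;> simp [specF, hx]

theorem specF_one (L : Nat) (hL : 1 ≤ L) : specF L 1 = 0 := by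
  obtain ⟨m, rfl⟩ : ∃ m, L = m + 1 := ⟨L - 1, by omega⟩
  simp [specF]

theorem specF_descend (j : Nat) : ∀ (base : Nat) (x : Int), 1 ≤ base → 2 ≤ x → x ≤ 2 ^ base →
    specF (base + j) x = if 2 ≤ x - j then specF base (x - j) else 0 := by
  induction j with
  | zero =>
    intro base x _ hx _
    rw [if_pos (show (2:Int) ≤ x - ((0:Nat):Int) by simpa using hx)]
    simp
  | succ j ih =>
    intro base x hb hx hxb
    have hmono : (2:Int) ^ base ≤ 2 ^ (base + j) :=
      pow_le_pow_right₀ (by norm_num) (by omega)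
    have hsplit : (2:Int) ^ (base + j + 2) = 4 * 2 ^ (base + j) := by ring
    have hpos : (0:Int) < 2 ^ (base + j) := by positivity
    have hle : x ≤ 1 + (2 ^ (base + j + 2) - 3) := by linarith
    have h1 : x ≠ 1 := by omega
    have h0 : 0 < x := by omega
    show specF ((base + j) + 1) x = _
    rw [specF, if_pos h0, if_neg h1, if_pos hle]
    by_cases h2 : 2 ≤ x - 1
    · rw [ih base (x - 1) hb h2 (by linarith)]
      have e1 : x - 1 - (j:Int) = x - ((j:Nat)+1 : Nat) := by push_cast; ring
      by_cases h3 : 2 ≤ x - ((j:Nat)+1 : Nat)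
      · rw [if_pos (by omega : 2 ≤ x - 1 - (j:Int)), if_pos h3, e1]
      · rw [if_neg (by omega : ¬ 2 ≤ x - 1 - (j:Int)), if_neg h3]
    · have hx2 : x = 2 := by omega
      subst hx2
      rw [show (2:Int) - 1 = 1 by norm_num, specF_one (base + j) (by omega)]
      rw [if_neg (by push_cast; omega)]

theorem loopB_spec (fuel : Nat) : ∀ (L : Nat) (eaten x : Int), L < fuel →
    loopB fuel eaten (L:Int) x = eaten + specF L x := by
  induction fuel with
  | zero => intro L eaten x h; omega
  | succ f ih =>
    intro L eaten x hLf
    rw [loopB]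
    by_cases hx : 0 < x
    · rw [if_pos hx]
      match L, hLf with
      | 0, hLf => simp [specF, hx]
      | (k+1 : Nat), hLf =>
        rw [if_neg (by push_cast; omega : ¬ ((k+1:Nat):Int) = 0)]
        by_cases hx1 : x = 1
        · subst hx1
          rw [if_pos rfl, specF_one (k+1) (by omega), add_zero]
        · rw [if_neg hx1]
          have hx2 : 2 ≤ x := by omega
          set b := PySem.Int.bitLength x with hbdef
          have hxb : x < (2:Int) ^ b := by
            have h := PySem.Int.lt_two_pow_bitLength x
            have : (x.natAbs : Int) < ((2 ^ b : Nat) : Int) := by exact_mod_cast h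
            rw [Int.natAbs_of_nonneg (by omega)] at this
            simpa using this
          have hb1 : 1 ≤ b := by
            by_contra hc
            have hb0 : b = 0 := by omega
            rw [hb0] at hxb; norm_num at hxb; omega
          by_cases hbl : (b:Int) < ((k+1:Nat):Int)
          · rw [if_pos hbl]
            obtain ⟨j, hj⟩ : ∃ j : Nat, k + 1 = b + j := ⟨k + 1 - b, by push_cast at hbl; omega⟩
            have hcast : ((k+1:Nat):Int) - (b:Int) = (j:Int) := by
              push_cast; push_cast at hbl; omega
            have hdesc := specF_descend j b x hb1 hx2 (by omega)
            by_cases hle : x - (((k+1:Nat):Int) - (b:Int)) ≤ 1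
            · rw [if_pos hle]
              rw [hj, hdesc, if_neg (by rw [hcast] at hle; omega), add_zero]
            · rw [if_neg hle, hcast]
              rw [ih b eaten (x - (j:Int)) (by push_cast at hbl; omega)]
              rw [hj, hdesc, if_pos (by rw [hcast] at hle; omega)]
          · rw [if_neg hbl]
            have e2 : (((k+1:Nat):Int) + 1).toNat = k + 2 := by push_cast; omega
            have e3 : (((k+1:Nat):Int)).toNat = k + 1 := by push_cast; omega
            have e4 : ((k+1:Nat):Int) - 1 = (k:Int) := by push_cast; ring
            rw [e2, e3, e4]
            have hkf : k < f := by omega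
            by_cases c1 : x ≤ 1 + ((2:Int) ^ (k+2) - 3)
            · rw [if_pos c1, ih k eaten (x-1) hkf]
              conv_rhs => rw [specF]
              rw [if_pos hx, if_neg hx1, if_pos c1]
            · rw [if_neg c1]
              by_cases c2 : x ≤ 2 + ((2:Int) ^ (k+2) - 3)
              · rw [if_pos c2]
                conv_rhs => rw [specF]
                rw [if_pos hx, if_neg hx1, if_neg c1, if_pos c2]
              · rw [if_neg c2]
                by_cases c3 : x ≤ 2 + 2 * ((2:Int) ^ (k+2) - 3)
                · rw [if_pos c3, ih k _ _ hkf]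
                  conv_rhs => rw [specF]
                  rw [if_pos hx, if_neg hx1, if_neg c1, if_neg c2, if_pos c3]
                  ring
                · rw [if_neg c3]
                  conv_rhs => rw [specF]
                  rw [if_pos hx, if_neg hx1, if_neg c1, if_neg c2, if_neg c3]
    · rw [if_neg hx, specF_nonpos L x hx, add_zero]

-- the body of A's filling loop, and dp/dp_patty just after the dp[0]=dp_patty[0]=1 assignments
def stepF : List Int × List Int → Int → List Int × List Int := fun st i =>
  (PySem.List.pySetD st.1 i (2 * PySem.List.pyGetD st.1 (i-1) 0 + 3),
   PySem.List.pySetD st.2 i (2 * PySem.List.pyGetD st.2 (i-1) 0 + 1))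

def initPair (N : Nat) : List Int × List Int :=
  ((List.replicate (N+1) (0:Int)).set 0 1, (List.replicate (N+1) (0:Int)).set 0 1)

theorem buildA_eq (N : Nat) : buildA (N:Int) =
    (PySem.List.pyRange 1 ((N:Int)+1)).foldl stepF (initPair N) := by
  unfold buildA initPair stepF
  rw [show (((N:Int))+1).toNat = N+1 from by omega,
      PySem.List.pySetD_of_nonneg _ _ (le_refl 0)]
  rfl

theorem initPair_get (N : Nat) :
    PySem.List.pyGetD (initPair N).1 ((0:Nat):Int) 0 = 1 ∧
    PySem.List.pyGetD (initPair N).2 ((0:Nat):Int) 0 = 1 := by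
  constructor <;>
    simp [initPair, List.replicate_succ]

theorem buildA_inv (N : Nat) : ∀ m : Nat, m ≤ N →
    ((PySem.List.pyRange 1 ((m:Int)+1)).foldl stepF (initPair N)).1.length = N+1 ∧
    ((PySem.List.pyRange 1 ((m:Int)+1)).foldl stepF (initPair N)).2.length = N+1 ∧
    ∀ i : Nat, i ≤ m →
      PySem.List.pyGetD ((PySem.List.pyRange 1 ((m:Int)+1)).foldl stepF (initPair N)).1 (i:Int) 0 = 2 ^ (i+2) - 3 ∧
      PySem.List.pyGetD ((PySem.List.pyRange 1 ((m:Int)+1)).foldl stepF (initPair N)).2 (i:Int) 0 = 2 ^ (i+1) - 1 := by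
  intro m
  induction m with
  | zero =>
    intro _
    rw [show ((0:Nat):Int) + 1 = 1 from by norm_num,
        show PySem.List.pyRange 1 1 = [] from rfl]
    refine ⟨by simp [initPair], by simp [initPair], ?_⟩
    intro i hi
    have hi0 : i = 0 := by omega
    subst hi0
    simpa using initPair_get N
  | succ m ih =>
    intro hm
    obtain ⟨hl1, hl2, hv⟩ := ih (by omega)
    have hsplit : PySem.List.pyRange 1 (((m+1:Nat):Int)+1) =
        PySem.List.pyRange 1 ((m:Int)+1) ++ [((m:Int)+1)] := by
      rw [show (((m+1:Nat)):Int) + 1 = ((m:Int)+1) + 1 from by push_cast; ring]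
      exact PySem.List.pyRange_one_succ_right (by omega)
    rw [hsplit, List.foldl_append]
    set st := (PySem.List.pyRange 1 ((m:Int)+1)).foldl stepF (initPair N) with hst
    have hcast : (m:Int) + 1 = ((m+1:Nat):Int) := by push_cast; ring
    have hme : (m:Int) + 1 - 1 = ((m:Nat):Int) := by push_cast; ring
    have hv1 : PySem.List.pyGetD st.1 ((m:Nat):Int) 0 = 2 ^ (m+2) - 3 := (hv m (le_refl m)).1
    have hv2 : PySem.List.pyGetD st.2 ((m:Nat):Int) 0 = 2 ^ (m+1) - 1 := (hv m (le_refl m)).2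
    have hstep : List.foldl stepF st [(m:Int)+1] =
        (PySem.List.pySetD st.1 ((m+1:Nat):Int) (2 ^ (m+3) - 3),
         PySem.List.pySetD st.2 ((m+1:Nat):Int) (2 ^ (m+2) - 1)) := by
      show stepF st ((m:Int)+1) = _
      unfold stepF
      rw [hme, hv1, hv2, hcast]
      have e1 : 2 * ((2:Int) ^ (m+2) - 3) + 3 = 2 ^ (m+3) - 3 := by ring
      have e2 : 2 * ((2:Int) ^ (m+1) - 1) + 1 = 2 ^ (m+2) - 1 := by ring
      rw [e1, e2]
    rw [hstep]
    have hlt : m + 1 < st.1.length := by omega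
    have hlt2 : m + 1 < st.2.length := by omega
    refine ⟨by simp [PySem.List.length_pySetD, hl1], by simp [PySem.List.length_pySetD, hl2], ?_⟩
    intro i hi
    rw [PySem.List.pyGetD_pySetD_natCast st.1 (m+1) i _ 0 hlt,
        PySem.List.pyGetD_pySetD_natCast st.2 (m+1) i _ 0 hlt2]
    by_cases hie : i = m + 1
    · subst hie
      rw [if_pos rfl, if_pos rfl]
      constructor <;> ring_nf
    · rw [if_neg hie, if_neg hie]
      exact hv i (by omega)

theorem buildA_spec (N : Nat) :
    ∀ i : Nat, i ≤ N →
      PySem.List.pyGetD (buildA (N:Int)).1 (i:Int) 0 = 2 ^ (i+2) - 3 ∧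
      PySem.List.pyGetD (buildA (N:Int)).2 (i:Int) 0 = 2 ^ (i+1) - 1 := by
  intro i hi
  rw [buildA_eq]
  exact (buildA_inv N N (le_refl N)).2.2 i hi

theorem loopA_spec (L : Nat) : ∀ (fuel : Nat) (eaten x : Int) (dp dpp : List Int),
    (∀ i : Nat, i < L → PySem.List.pyGetD dp (i:Int) 0 = 2 ^ (i+2) - 3) →
    (∀ i : Nat, i < L → PySem.List.pyGetD dpp (i:Int) 0 = 2 ^ (i+1) - 1) →
    L < fuel →
    loopA dp dpp fuel eaten (L:Int) x = eaten + specF L x := by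
  induction L with
  | zero =>
    intro fuel eaten x dp dpp _ _ hf
    obtain ⟨f, rfl⟩ : ∃ f, fuel = f + 1 := ⟨fuel - 1, by omega⟩
    rw [loopA]
    by_cases hx : 0 < x
    · rw [if_pos hx]; simp [specF, hx]
    · rw [if_neg hx, specF_nonpos 0 x hx, add_zero]
  | succ k ih =>
    intro fuel eaten x dp dpp hdp hdpp hf
    obtain ⟨f, rfl⟩ : ∃ f, fuel = f + 1 := ⟨fuel - 1, by omega⟩
    rw [loopA]
    by_cases hx : 0 < x
    · rw [if_pos hx, if_neg (by push_cast; omega : ¬ ((k+1:Nat):Int) = 0)]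
      by_cases hx1 : x = 1
      · subst hx1; rw [if_pos rfl, specF_one (k+1) (by omega), add_zero]
      · rw [if_neg hx1]
        have e4 : ((k+1:Nat):Int) - 1 = (k:Int) := by push_cast; ring
        rw [e4, hdp k (by omega), hdpp k (by omega)]
        have hdp' : ∀ i : Nat, i < k → PySem.List.pyGetD dp (i:Int) 0 = 2 ^ (i+2) - 3 :=
          fun i hi => hdp i (by omega)
        have hdpp' : ∀ i : Nat, i < k → PySem.List.pyGetD dpp (i:Int) 0 = 2 ^ (i+1) - 1 :=
          fun i hi => hdpp i (by omega)
        have hkf : k < f := by omega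
        by_cases c1 : x ≤ 1 + ((2:Int) ^ (k+2) - 3)
        · rw [if_pos c1, ih f eaten (x-1) dp dpp hdp' hdpp' hkf]
          conv_rhs => rw [specF]
          rw [if_pos hx, if_neg hx1, if_pos c1]
        · rw [if_neg c1]
          have hge : 2 + ((2:Int) ^ (k+2) - 3) ≤ x :=
            le_trans (by linarith) (Int.add_one_le_iff.mpr (lt_of_not_ge c1))
          by_cases c2e : x = 2 + ((2:Int) ^ (k+2) - 3)
          · rw [if_pos c2e]
            conv_rhs => rw [specF]
            rw [if_pos hx, if_neg hx1, if_neg c1, if_pos (le_of_eq c2e)]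
          · rw [if_neg c2e]
            have hc2 : ¬ x ≤ 2 + ((2:Int) ^ (k+2) - 3) :=
              fun hle => c2e (le_antisymm hle hge)
            by_cases c3 : x ≤ 2 + 2 * ((2:Int) ^ (k+2) - 3)
            · rw [if_pos c3, ih f _ _ dp dpp hdp' hdpp' hkf]
              conv_rhs => rw [specF]
              rw [if_pos hx, if_neg hx1, if_neg c1, if_neg hc2, if_pos c3]
              ring
            · rw [if_neg c3]
              conv_rhs => rw [specF]
              rw [if_pos hx, if_neg hx1, if_neg c1, if_neg hc2, if_neg c3]
    · rw [if_neg hx, specF_nonpos _ x hx, add_zero]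



-- ===== VERDICT (by name: the statement is the Claim_ definition above) =====
theorem solution_spec : Claim_equal_solution := by
  intro n x _ hpre
  unfold Spec_solution solution solution_alt
  obtain ⟨N, rfl⟩ := Int.eq_ofNat_of_zero_le hpre
  rw [loopA_spec N _ _ _ _ _ (fun i hi => (buildA_spec N i (le_of_lt hi)).1)
        (fun i hi => (buildA_spec N i (le_of_lt hi)).2) (by simp),
      loopB_spec _ N _ _ (by simp)]
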